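-- pv_equiv track=rewrite | github.com/molly5617/NTU-CV | HW8/HW8.py | expan
-- ===== SOURCE A (Python) =====
-- def expan(arr):
--     m=len(arr)
--     n=len(arr[0])
--     res=[[0]*(n+2) for i in range(m+2)]
--     for i in range(1,m+1):
--         res[i][0]=arr[i-1][0]
--         res[i][n+1]=arr[i-1][n-1]
--     for j in range(1,n+1):
--         res[0][j]=arr[0][j-1]
--         res[m+1][j]=arr[m-1][j-1]
--     res[0][0]=arr[0][0]
--     res[0][n+1]=arr[0][n-1]
--     res[m+1][0]=arr[m-1][0]
--     res[m+1][n+1]=arr[m-1][n-1]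
--     for i in range(1,m+1):
--         for j in range(1,n+1):
--             res[i][j]=arr[i-1][j-1]
--     return res
-- ===== SOURCE B (Python) =====
-- def expan(arr):
--     m = len(arr)
--     n = len(arr[0])
--     return [[arr[min(max(i - 1, 0), m - 1)][min(max(j - 1, 0), n - 1)]
--              for j in range(n + 2)]
--             for i in range(m + 2)]
-- ===== Notes on version B (the rewrite author's own statement) =====
-- stated objective: simpler
-- what changed: Replaces A's five separate phases (zero grid, two edge loops, four corner assignments, interior loop) by one uniform comprehension that clamps the source index, writing every cell in a single pass.
import Mathlib
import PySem

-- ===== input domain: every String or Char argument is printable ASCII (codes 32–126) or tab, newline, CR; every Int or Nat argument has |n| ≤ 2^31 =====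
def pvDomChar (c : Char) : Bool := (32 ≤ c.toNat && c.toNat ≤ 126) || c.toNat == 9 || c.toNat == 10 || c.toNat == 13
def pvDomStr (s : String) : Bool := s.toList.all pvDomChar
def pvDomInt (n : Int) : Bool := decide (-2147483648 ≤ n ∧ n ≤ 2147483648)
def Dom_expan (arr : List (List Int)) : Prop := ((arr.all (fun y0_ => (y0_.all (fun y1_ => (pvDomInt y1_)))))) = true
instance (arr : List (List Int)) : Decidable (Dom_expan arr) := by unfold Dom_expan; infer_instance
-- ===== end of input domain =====

-- B replaces A's five phases (zero grid, two edge loops, four corners, interior copy) by one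
-- uniform clamped-index pass; objective: simpler. Equivalence of return values on Pre_.

-- ===== PORT A =====
-- res[i][j] = v  (a write to a mutable grid; a write out of range is impossible inside Pre_)
def setCell (r : List (List Int)) (i j : Nat) (v : Int) : List (List Int) :=
  r.set i ((r.getD i []).set j v)

-- arr[i][j] reads of A (all indices nonnegative and in range inside Pre_)
def aW (arr : List (List Int)) (i j : Nat) : Int := (arr.getD i []).getD j 0

def expan (arr : List (List Int)) : List (List Int) :=
  let m := arr.length
  let n := (arr.getD 0 []).length
  -- res=[[0]*(n+2) for i in range(m+2)]
  let res0 := List.replicate (m+2) (List.replicate (n+2) (0:Int))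
  -- for i in range(1,m+1): res[i][0]=arr[i-1][0]; res[i][n+1]=arr[i-1][n-1]
  let res1 := (List.range m).foldl
    (fun r k => setCell (setCell r (k+1) 0 (aW arr k 0)) (k+1) (n+1) (aW arr k (n-1))) res0
  -- for j in range(1,n+1): res[0][j]=arr[0][j-1]; res[m+1][j]=arr[m-1][j-1]
  let res2 := (List.range n).foldl
    (fun r k => setCell (setCell r 0 (k+1) (aW arr 0 k)) (m+1) (k+1) (aW arr (m-1) k)) res1
  -- the four corner assignments
  let res3 := setCell (setCell (setCell (setCell res2 0 0 (aW arr 0 0))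
      0 (n+1) (aW arr 0 (n-1))) (m+1) 0 (aW arr (m-1) 0)) (m+1) (n+1) (aW arr (m-1) (n-1))
  -- for i in range(1,m+1): for j in range(1,n+1): res[i][j]=arr[i-1][j-1]
  (List.range m).foldl
    (fun r k => (List.range n).foldl (fun r2 k2 => setCell r2 (k+1) (k2+1) (aW arr k k2)) r) res3

-- ===== PORT B =====
def expan_alt (arr : List (List Int)) : List (List Int) :=
  let m := arr.length
  let n := (arr.getD 0 []).length
  (List.range (m+2)).map (fun i =>
    (List.range (n+2)).map (fun j =>
      (arr.getD (min (max (Int.ofNat i - 1) 0) (Int.ofNat m - 1)).toNat []).getD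
        (min (max (Int.ofNat j - 1) 0) (Int.ofNat n - 1)).toNat 0))

-- ===== PRECONDITION & SPEC =====
-- Pre_ excludes exactly the inputs on which the Python A raises IndexError: the empty list,
-- an empty first row, and arrays with a row shorter than the first row.
def Pre_expan (arr : List (List Int)) : Prop :=
  arr ≠ [] ∧ 0 < (arr.getD 0 []).length ∧ ∀ row ∈ arr, (arr.getD 0 []).length ≤ row.length
instance (arr : List (List Int)) : Decidable (Pre_expan arr) := by unfold Pre_expan; infer_instance

def pvWitness_expan : List (List Int) := [[1, 2], [3, 4]]

def Spec_expan (arr : List (List Int)) (out : List (List Int)) : Prop := out = expan_alt arr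
instance (arr : List (List Int)) (out : List (List Int)) : Decidable (Spec_expan arr out) := by unfold Spec_expan; infer_instance

-- ===== CLAIM (what is proved, stated in full; the proofs are below) =====
def Claim_equal_expan : Prop := ∀ (arr : List (List Int)), Dom_expan arr → Pre_expan arr → Spec_expan arr (expan arr)

-- ===== LEMMAS AND PROOFS =====

def Shape (r : List (List Int)) (m n : Nat) : Prop :=
  r.length = m ∧ ∀ row ∈ r, row.length = n

-- r.getD i [] as an element
lemma getD_eq_get (r : List (List Int)) (i : Nat) (h : i < r.length) : r.getD i [] = r[i] := by
  simp [List.getD_eq_getElem?_getD, List.getElem?_eq_getElem h]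

lemma getD_mem (r : List (List Int)) (i : Nat) (h : i < r.length) : r.getD i [] ∈ r := by
  rw [getD_eq_get r i h]; exact List.getElem_mem h

lemma shape_setCell {r : List (List Int)} {m n : Nat} (h : Shape r m n) (i j : Nat) (v : Int) :
    Shape (setCell r i j v) m n := by
  obtain ⟨hl, hrow⟩ := h
  refine ⟨by simp [setCell, hl], ?_⟩
  intro row hm
  by_cases hi : i < r.length
  · rcases List.mem_or_eq_of_mem_set hm with h1 | h2
    · exact hrow _ h1
    · subst h2; simpa using hrow _ (getD_mem r i hi)
  · rw [setCell, List.set_eq_of_length_le (by omega : r.length ≤ i)] at hm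
    exact hrow _ hm

lemma foldl_pres {α : Type} (P : List (List Int) → Prop) (f : List (List Int) → α → List (List Int))
    (hf : ∀ r a, P r → P (f r a)) :
    ∀ (l : List α) (r : List (List Int)), P r → P (l.foldl f r) := by
  intro l
  induction l with
  | nil => intro r h; exact h
  | cons a t ih => intro r h; exact ih _ (hf r a h)

def get2 (r : List (List Int)) (i j : Nat) : Int := (r.getD i []).getD j 0

lemma get2_setCell_ne {r : List (List Int)} {a b i j : Nat} (h : i ≠ a ∨ j ≠ b) (v : Int) :
    get2 (setCell r a b v) i j = get2 r i j := by
  rcases h with h | h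
  · simp [get2, setCell, List.getD_eq_getElem?_getD, List.getElem?_set_ne (by omega : a ≠ i)]
  · by_cases hia : i = a
    · subst hia
      by_cases hi : i < r.length
      · simp [get2, setCell, List.getD_eq_getElem?_getD, List.getElem?_set_self hi,
          List.getElem?_set_ne (by omega : b ≠ j)]
      · simp [get2, setCell, List.set_eq_of_length_le (by omega : r.length ≤ i)]
    · simp [get2, setCell, List.getD_eq_getElem?_getD,
        List.getElem?_set_ne (fun hh => hia hh.symm)]

lemma get2_setCell_eq {r : List (List Int)} {i j : Nat} (hi : i < r.length)
    (hj : j < (r.getD i []).length) (v : Int) :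
    get2 (setCell r i j v) i j = v := by
  have hj' : j < (r.getD i []).length := hj
  rw [List.getD_eq_getElem?_getD] at hj'
  simp [get2, setCell, List.getD_eq_getElem?_getD, List.getElem?_set_self hi,
    List.getElem?_set_self hj']

lemma shape_get2_row_len {r : List (List Int)} {m n : Nat} (h : Shape r m n) {i : Nat}
    (hi : i < m) : (r.getD i []).length = n :=
  h.2 _ (getD_mem r i (by rw [h.1]; exact hi))

-- vertical edge loop
lemma loop1_get2 (m n : Nat) (w1 w2 : Nat → Int) :
    ∀ (t : Nat), t ≤ m → ∀ r, Shape r (m+2) (n+2) → ∀ i j, j < n + 2 →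
    get2 ((List.range t).foldl
      (fun r k => setCell (setCell r (k+1) 0 (w1 k)) (k+1) (n+1) (w2 k)) r) i j
    = if 1 ≤ i ∧ i ≤ t ∧ j = 0 then w1 (i-1)
      else if 1 ≤ i ∧ i ≤ t ∧ j = n+1 then w2 (i-1)
      else get2 r i j := by
  intro t
  induction t with
  | zero =>
    intro _ r _ i j _
    simp only [List.range_zero, List.foldl_nil]
    rw [if_neg (by omega), if_neg (by omega)]
  | succ t ih =>
    intro ht r hr i j hj
    rw [List.range_succ, List.foldl_append, List.foldl_cons, List.foldl_nil]
    have hprev : Shape ((List.range t).foldl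
        (fun r k => setCell (setCell r (k+1) 0 (w1 k)) (k+1) (n+1) (w2 k)) r) (m+2) (n+2) :=
      foldl_pres (fun r => Shape r (m+2) (n+2)) _ (fun r k h => shape_setCell (shape_setCell h _ _ _) _ _ _) _ _ hr
    set prev := (List.range t).foldl
        (fun r k => setCell (setCell r (k+1) 0 (w1 k)) (k+1) (n+1) (w2 k)) r with hprevdef
    have hs1 : Shape (setCell prev (t+1) 0 (w1 t)) (m+2) (n+2) := shape_setCell hprev _ _ _
    by_cases hc1 : i = t+1 ∧ j = n+1
    · obtain ⟨hi1, hj1⟩ := hc1; subst hi1; subst hj1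
      rw [get2_setCell_eq (by rw [hs1.1]; omega)
        (by rw [shape_get2_row_len hs1 (by omega : t+1 < m+2)]; omega)]
      rw [if_neg (by omega), if_pos (by omega)]
      simp
    · by_cases hc2 : i = t+1 ∧ j = 0
      · obtain ⟨hi1, hj1⟩ := hc2; subst hi1; subst hj1
        rw [get2_setCell_ne (by omega) _,
          get2_setCell_eq (by rw [hprev.1]; omega)
            (by rw [shape_get2_row_len hprev (by omega : t+1 < m+2)]; omega)]
        rw [if_pos (by omega)]
        simp
      · rw [get2_setCell_ne (by omega) _, get2_setCell_ne (by omega) _,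
          ih (by omega) r hr i j hj]
        split_ifs <;> first | rfl | omega

-- horizontal edge loop
lemma loop2_get2 (m n : Nat) (u1 u2 : Nat → Int) :
    ∀ (t : Nat), t ≤ n → ∀ r, Shape r (m+2) (n+2) → ∀ i j, j < n + 2 →
    get2 ((List.range t).foldl
      (fun r k => setCell (setCell r 0 (k+1) (u1 k)) (m+1) (k+1) (u2 k)) r) i j
    = if i = 0 ∧ 1 ≤ j ∧ j ≤ t then u1 (j-1)
      else if i = m+1 ∧ 1 ≤ j ∧ j ≤ t then u2 (j-1)
      else get2 r i j := by
  intro t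
  induction t with
  | zero =>
    intro _ r _ i j _
    simp only [List.range_zero, List.foldl_nil]
    rw [if_neg (by omega), if_neg (by omega)]
  | succ t ih =>
    intro ht r hr i j hj
    rw [List.range_succ, List.foldl_append, List.foldl_cons, List.foldl_nil]
    have hprev : Shape ((List.range t).foldl
        (fun r k => setCell (setCell r 0 (k+1) (u1 k)) (m+1) (k+1) (u2 k)) r) (m+2) (n+2) :=
      foldl_pres (fun r => Shape r (m+2) (n+2)) _ (fun r k h => shape_setCell (shape_setCell h _ _ _) _ _ _) _ _ hr
    set prev := (List.range t).foldl
        (fun r k => setCell (setCell r 0 (k+1) (u1 k)) (m+1) (k+1) (u2 k)) r with hprevdef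
    have hs1 : Shape (setCell prev 0 (t+1) (u1 t)) (m+2) (n+2) := shape_setCell hprev _ _ _
    by_cases hc1 : i = m+1 ∧ j = t+1
    · obtain ⟨hi1, hj1⟩ := hc1; subst hi1; subst hj1
      rw [get2_setCell_eq (by rw [hs1.1]; omega)
        (by rw [shape_get2_row_len hs1 (by omega : m+1 < m+2)]; omega)]
      rw [if_neg (by omega), if_pos (by omega)]
      simp
    · by_cases hc2 : i = 0 ∧ j = t+1
      · obtain ⟨hi1, hj1⟩ := hc2; subst hi1; subst hj1
        rw [get2_setCell_ne (by omega) _,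
          get2_setCell_eq (by rw [hprev.1]; omega)
            (by rw [shape_get2_row_len hprev (by omega : 0 < m+2)]; omega)]
        rw [if_pos (by omega)]
        simp
      · rw [get2_setCell_ne (by omega) _, get2_setCell_ne (by omega) _,
          ih (by omega) r hr i j hj]
        split_ifs <;> first | rfl | omega

-- interior inner loop (row k)
lemma inner_get2 (m n : Nat) (v : Nat → Nat → Int) (k : Nat) (hk : k < m) :
    ∀ (t : Nat), t ≤ n → ∀ r, Shape r (m+2) (n+2) → ∀ i j,
    get2 ((List.range t).foldl (fun r2 k2 => setCell r2 (k+1) (k2+1) (v k k2)) r) i j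
    = if i = k+1 ∧ 1 ≤ j ∧ j ≤ t then v k (j-1) else get2 r i j := by
  intro t
  induction t with
  | zero =>
    intro _ r _ i j
    simp only [List.range_zero, List.foldl_nil]
    rw [if_neg (by omega)]
  | succ t ih =>
    intro ht r hr i j
    rw [List.range_succ, List.foldl_append, List.foldl_cons, List.foldl_nil]
    have hprev : Shape ((List.range t).foldl
        (fun r2 k2 => setCell r2 (k+1) (k2+1) (v k k2)) r) (m+2) (n+2) :=
      foldl_pres (fun r => Shape r (m+2) (n+2)) _ (fun r a h => shape_setCell h _ _ _) _ _ hr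
    by_cases hc : i = k+1 ∧ j = t+1
    · obtain ⟨hi1, hj1⟩ := hc; subst hi1; subst hj1
      rw [get2_setCell_eq (by rw [hprev.1]; omega)
        (by rw [shape_get2_row_len hprev (by omega : k+1 < m+2)]; omega)]
      rw [if_pos (by omega)]
      simp
    · rw [get2_setCell_ne (by omega) _, ih (by omega) r hr i j]
      split_ifs <;> first | rfl | omega

-- interior double loop
lemma outer_get2 (m n : Nat) (v : Nat → Nat → Int) :
    ∀ (t : Nat), t ≤ m → ∀ r, Shape r (m+2) (n+2) → ∀ i j,
    get2 ((List.range t).foldl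
      (fun r k => (List.range n).foldl (fun r2 k2 => setCell r2 (k+1) (k2+1) (v k k2)) r) r) i j
    = if 1 ≤ i ∧ i ≤ t ∧ 1 ≤ j ∧ j ≤ n then v (i-1) (j-1) else get2 r i j := by
  intro t
  induction t with
  | zero =>
    intro _ r _ i j
    simp only [List.range_zero, List.foldl_nil]
    rw [if_neg (by omega)]
  | succ t ih =>
    intro ht r hr i j
    rw [List.range_succ, List.foldl_append, List.foldl_cons, List.foldl_nil]
    have hprev : Shape ((List.range t).foldl
        (fun r k => (List.range n).foldl (fun r2 k2 => setCell r2 (k+1) (k2+1) (v k k2)) r) r)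
        (m+2) (n+2) :=
      foldl_pres (fun r => Shape r (m+2) (n+2)) _
        (fun r a h => foldl_pres (fun r => Shape r (m+2) (n+2)) _
          (fun r a h => shape_setCell h _ _ _) _ _ h) _ _ hr
    rw [inner_get2 m n v t (by omega) n le_rfl _ hprev i j,
      ih (by omega) r hr i j]
    split_ifs <;> first | rfl | omega | rw [show i - 1 = t from by omega]

lemma getD_eq_get' (l : List Int) (i : Nat) (h : i < l.length) : l.getD i 0 = l[i] := by
  simp [List.getD_eq_getElem?_getD, List.getElem?_eq_getElem h]

lemma shape_expan (arr : List (List Int)) :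
    Shape (expan arr) (arr.length + 2) ((arr.getD 0 []).length + 2) := by
  simp only [expan]
  refine foldl_pres (fun r => Shape r _ _) _
    (fun r a h => foldl_pres (fun r => Shape r _ _) _
      (fun r a h => shape_setCell h _ _ _) _ _ h) _ _ ?_
  refine shape_setCell (shape_setCell (shape_setCell (shape_setCell ?_ _ _ _) _ _ _) _ _ _) _ _ _
  refine foldl_pres (fun r => Shape r _ _) _
    (fun r a h => shape_setCell (shape_setCell h _ _ _) _ _ _) _ _ ?_
  refine foldl_pres (fun r => Shape r _ _) _
    (fun r a h => shape_setCell (shape_setCell h _ _ _) _ _ _) _ _ ?_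
  exact ⟨by simp, fun row h => by rw [List.eq_of_mem_replicate h]; simp⟩

lemma get2_expan (arr : List (List Int)) (hm : 1 ≤ arr.length)
    (hn : 1 ≤ (arr.getD 0 []).length) (i j : Nat)
    (hi : i < arr.length + 2) (hj : j < (arr.getD 0 []).length + 2) :
    get2 (expan arr) i j
      = aW arr (min (i-1) (arr.length - 1)) (min (j-1) ((arr.getD 0 []).length - 1)) := by
  simp only [expan]
  set m := arr.length with hmdef
  set n := (arr.getD 0 []).length with hndef
  set R0 := List.replicate (m+2) (List.replicate (n+2) (0:Int)) with hR0
  set R1 := (List.range m).foldl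
    (fun r k => setCell (setCell r (k+1) 0 (aW arr k 0)) (k+1) (n+1) (aW arr k (n-1))) R0 with hR1
  set R2 := (List.range n).foldl
    (fun r k => setCell (setCell r 0 (k+1) (aW arr 0 k)) (m+1) (k+1) (aW arr (m-1) k)) R1 with hR2
  set R3 := setCell (setCell (setCell (setCell R2 0 0 (aW arr 0 0))
      0 (n+1) (aW arr 0 (n-1))) (m+1) 0 (aW arr (m-1) 0)) (m+1) (n+1) (aW arr (m-1) (n-1)) with hR3
  have hs0 : Shape R0 (m+2) (n+2) := by
    rw [hR0]
    exact ⟨by simp, fun row h => by rw [List.eq_of_mem_replicate h]; simp⟩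
  have hs1 : Shape R1 (m+2) (n+2) := by
    rw [hR1]
    exact foldl_pres (fun r => Shape r (m+2) (n+2)) _
      (fun r k h => shape_setCell (shape_setCell h _ _ _) _ _ _) _ _ hs0
  have hs2 : Shape R2 (m+2) (n+2) := by
    rw [hR2]
    exact foldl_pres (fun r => Shape r (m+2) (n+2)) _
      (fun r k h => shape_setCell (shape_setCell h _ _ _) _ _ _) _ _ hs1
  have hc1 : Shape (setCell R2 0 0 (aW arr 0 0)) (m+2) (n+2) := shape_setCell hs2 _ _ _
  have hc2 : Shape (setCell (setCell R2 0 0 (aW arr 0 0)) 0 (n+1) (aW arr 0 (n-1)))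
      (m+2) (n+2) := shape_setCell hc1 _ _ _
  have hc3 : Shape (setCell (setCell (setCell R2 0 0 (aW arr 0 0)) 0 (n+1) (aW arr 0 (n-1)))
      (m+1) 0 (aW arr (m-1) 0)) (m+2) (n+2) := shape_setCell hc2 _ _ _
  have hs3 : Shape R3 (m+2) (n+2) := by rw [hR3]; exact shape_setCell hc3 _ _ _
  rw [outer_get2 m n (fun a b => aW arr a b) m le_rfl _ hs3 i j]
  by_cases hint : 1 ≤ i ∧ i ≤ m ∧ 1 ≤ j ∧ j ≤ n
  · rw [if_pos hint, show min (i-1) (m-1) = i-1 from by omega,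
      show min (j-1) (n-1) = j-1 from by omega]
  · rw [if_neg hint, hR3]
    by_cases h4 : i = m+1 ∧ j = n+1
    · obtain ⟨hi1, hj1⟩ := h4; subst hi1; subst hj1
      rw [get2_setCell_eq (by rw [hc3.1]; omega)
        (by rw [shape_get2_row_len hc3 (by omega : m+1 < m+2)]; omega)]
      rw [show min (m+1-1) (m-1) = m-1 from by omega, show min (n+1-1) (n-1) = n-1 from by omega]
    · by_cases h3 : i = m+1 ∧ j = 0
      · obtain ⟨hi1, hj1⟩ := h3; subst hi1; subst hj1
        rw [get2_setCell_ne (by omega) _,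
          get2_setCell_eq (by rw [hc2.1]; omega)
            (by rw [shape_get2_row_len hc2 (by omega : m+1 < m+2)]; omega)]
        rw [show min (m+1-1) (m-1) = m-1 from by omega, show min (0-1) (n-1) = 0 from by omega]
      · by_cases h2 : i = 0 ∧ j = n+1
        · obtain ⟨hi1, hj1⟩ := h2; subst hi1; subst hj1
          rw [get2_setCell_ne (by omega) _, get2_setCell_ne (by omega) _,
            get2_setCell_eq (by rw [hc1.1]; omega)
              (by rw [shape_get2_row_len hc1 (by omega : 0 < m+2)]; omega)]
          rw [show min (0-1) (m-1) = 0 from by omega, show min (n+1-1) (n-1) = n-1 from by omega]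
        · by_cases h1 : i = 0 ∧ j = 0
          · obtain ⟨hi1, hj1⟩ := h1; subst hi1; subst hj1
            rw [get2_setCell_ne (by omega) _, get2_setCell_ne (by omega) _,
              get2_setCell_ne (by omega) _,
              get2_setCell_eq (by rw [hs2.1]; omega)
                (by rw [shape_get2_row_len hs2 (by omega : 0 < m+2)]; omega)]
            rw [show min (0-1) (m-1) = 0 from by omega, show min (0-1) (n-1) = 0 from by omega]
          · rw [get2_setCell_ne (by omega) _, get2_setCell_ne (by omega) _,
              get2_setCell_ne (by omega) _, get2_setCell_ne (by omega) _, hR2,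
              loop2_get2 m n (fun b => aW arr 0 b) (fun b => aW arr (m-1) b) n le_rfl _ hs1 i j hj]
            by_cases e1 : i = 0 ∧ 1 ≤ j ∧ j ≤ n
            · rw [if_pos e1, show min (i-1) (m-1) = 0 from by omega,
                show min (j-1) (n-1) = j-1 from by omega]
            · rw [if_neg e1]
              by_cases e2 : i = m+1 ∧ 1 ≤ j ∧ j ≤ n
              · rw [if_pos e2, show min (i-1) (m-1) = m-1 from by omega,
                  show min (j-1) (n-1) = j-1 from by omega]
              · rw [if_neg e2, hR1,
                  loop1_get2 m n (fun a => aW arr a 0) (fun a => aW arr a (n-1)) m le_rfl _ hs0 i j hj]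
                by_cases e3 : 1 ≤ i ∧ i ≤ m ∧ j = 0
                · rw [if_pos e3, show min (i-1) (m-1) = i-1 from by omega,
                    show min (j-1) (n-1) = 0 from by omega]
                · rw [if_neg e3]
                  by_cases e4 : 1 ≤ i ∧ i ≤ m ∧ j = n+1
                  · rw [if_pos e4, show min (i-1) (m-1) = i-1 from by omega,
                      show min (j-1) (n-1) = n-1 from by omega]
                  · exfalso; omega

-- ===== VERDICT (by name: the statement is the Claim_ definition above) =====
theorem expan_spec : Claim_equal_expan := by
  intro arr _ hpre
  obtain ⟨hne, hn, -⟩ := hpre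
  have hm : 1 ≤ arr.length := List.length_pos_of_ne_nil hne
  unfold Spec_expan
  have hshape := shape_expan arr
  have hlen_alt : (expan_alt arr).length = arr.length + 2 := by simp [expan_alt]
  apply List.ext_getElem (by rw [hshape.1, hlen_alt])
  intro i h1 h2
  have hi : i < arr.length + 2 := by rw [← hshape.1]; exact h1
  have hrowlen : (expan arr)[i].length = (arr.getD 0 []).length + 2 :=
    hshape.2 _ (List.getElem_mem h1)
  have hrowlen_alt : (expan_alt arr)[i].length = (arr.getD 0 []).length + 2 := by
    simp [expan_alt]
  apply List.ext_getElem (by rw [hrowlen, hrowlen_alt])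
  intro j hj1 hj2
  have hj : j < (arr.getD 0 []).length + 2 := by rw [← hrowlen]; exact hj1
  have hL : (expan arr)[i][j] = get2 (expan arr) i j := by
    rw [get2, getD_eq_get _ _ h1, getD_eq_get' _ _ hj1]
  rw [hL, get2_expan arr hm hn i j hi hj]
  have hR : (expan_alt arr)[i][j]
      = (arr.getD (min (max (Int.ofNat i - 1) 0) (Int.ofNat arr.length - 1)).toNat []).getD
          (min (max (Int.ofNat j - 1) 0) (Int.ofNat (arr.getD 0 []).length - 1)).toNat 0 := by
    simp only [expan_alt, List.getElem_map, List.getElem_range]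
  rw [hR, show (min (max (Int.ofNat i - 1) 0) (Int.ofNat arr.length - 1)).toNat
        = min (i-1) (arr.length - 1) from by simp only [Int.ofNat_eq_natCast]; omega,
    show (min (max (Int.ofNat j - 1) 0) (Int.ofNat (arr.getD 0 []).length - 1)).toNat
        = min (j-1) ((arr.getD 0 []).length - 1) from by simp only [Int.ofNat_eq_natCast]; omega]
  rfl
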